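-- pv_equiv track=rewrite | github.com/DK-G/PicsPickPrompt | img2prompt/utils/text_filters.py | compress_framing
-- ===== SOURCE A (Python) =====
-- FRAMING_ORDER = [
--     "portrait",
--     "upper body",
--     "head-and-shoulders framing",
--     "bust shot",
--     "three-quarter view",
--     "full body",
--     "full-length framing",
-- ]
--
-- FRAMING_SET = {t.lower() for t in FRAMING_ORDER}
--
-- def compress_framing(tokens: list[str], k: int = 2) -> list[str]:
--     keep, others, seen = [], [], set()
--     for t in tokens:
--         tl = t.strip().lower()
--         if tl in FRAMING_SET and tl not in seen:
--             keep.append(tl)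
--             seen.add(tl)
--         else:
--             others.append(t)
--     keep = sorted(keep, key=lambda x: FRAMING_ORDER.index(x))[:k]
--     return [t for t in others] + keep
-- ===== SOURCE B (Python) =====
-- FRAMING_ORDER = [
--     "portrait",
--     "upper body",
--     "head-and-shoulders framing",
--     "bust shot",
--     "three-quarter view",
--     "full body",
--     "full-length framing",
-- ]
--
-- FRAMING_SET = {t.lower() for t in FRAMING_ORDER}
--
-- def compress_framing(tokens: list[str], k: int = 2) -> list[str]:
--     norm = [t.strip().lower() for t in tokens]
--     keep = [f for f in FRAMING_ORDER if f in norm][:k]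
--     others = [t for i, t in enumerate(tokens)
--               if norm[i] not in FRAMING_SET or norm[i] in norm[:i]]
--     return others + keep
-- ===== Notes on version B (the rewrite author's own statement) =====
-- stated objective: alternative
-- what changed: B replaces A's single accumulating loop with a mutable seen-set plus a key-based sort of the kept framing terms by a normalized-list precomputation: keep is built by scanning FRAMING_ORDER in its fixed order (no sort), and others by a positional comprehension testing first occurrence via the normalized prefix.
import Mathlib
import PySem

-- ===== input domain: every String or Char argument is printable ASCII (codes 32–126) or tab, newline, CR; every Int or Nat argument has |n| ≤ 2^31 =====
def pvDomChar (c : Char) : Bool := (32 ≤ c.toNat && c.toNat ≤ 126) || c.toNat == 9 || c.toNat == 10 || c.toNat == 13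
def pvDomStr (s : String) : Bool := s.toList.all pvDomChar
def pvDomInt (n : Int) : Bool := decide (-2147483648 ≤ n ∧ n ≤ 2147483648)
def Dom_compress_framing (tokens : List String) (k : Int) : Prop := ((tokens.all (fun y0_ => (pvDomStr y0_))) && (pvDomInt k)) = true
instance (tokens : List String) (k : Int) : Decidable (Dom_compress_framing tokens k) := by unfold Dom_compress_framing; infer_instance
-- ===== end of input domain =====

-- B replaces A's sort of the kept framing terms by a single order-scan of FRAMING_ORDER and
-- replaces A's accumulate-with-mutable-seen loop by comprehensions over the normalized list (objective: alternative decomposition).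

-- ===== PORT A =====
def pvFramingOrder : List String :=
  ["portrait", "upper body", "head-and-shoulders framing", "bust shot",
   "three-quarter view", "full body", "full-length framing"]

def pvFramingSet : PySem.Set String :=
  PySem.Set.ofList (pvFramingOrder.map (fun t => PySem.Str.lower t))

-- t.strip().lower()  (shared module-level normalization, appears verbatim in both Pythons)
def pvNorm (t : String) : String := PySem.Str.lower (PySem.Str.strip t)

-- the body of A's for-loop, on state (keep, others, seen)
def pvStepA (s : List String × List String × PySem.Set String) (t : String) :
    List String × List String × PySem.Set String :=
  let tl := pvNorm t
  if PySem.Set.contains pvFramingSet tl && !(PySem.Set.contains s.2.2 tl) then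
    (s.1 ++ [tl], s.2.1, PySem.Set.add s.2.2 tl)
  else
    (s.1, s.2.1 ++ [t], s.2.2)

-- FRAMING_ORDER.index(x): on A's keep list the element is always present (keep ⊆ FRAMING_SET,
-- whose members equal FRAMING_ORDER's entries), so Python's ValueError branch (.getD default) is unreachable
def pvKey (x : String) : Nat := (PySem.List.index? pvFramingOrder x).getD 0

def compress_framing (tokens : List String) (k : Int) : List String :=
  let st := tokens.foldl pvStepA ([], [], [])
  let keep := PySem.List.slice (PySem.List.sorted st.1 pvKey false) none (some k)
  st.2.1.map (fun t => t) ++ keep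

-- ===== PORT B =====
-- the comprehension filter: norm[i] not in FRAMING_SET or norm[i] in norm[:i]
def pvCondB (norm : List String) (p : Int × String) : Bool :=
  !(PySem.Set.contains pvFramingSet (PySem.List.pyGetD norm p.1 "")) ||
    (PySem.List.slice norm none (some p.1)).contains (PySem.List.pyGetD norm p.1 "")

def compress_framing_alt (tokens : List String) (k : Int) : List String :=
  let norm := tokens.map pvNorm
  let keep := PySem.List.slice (pvFramingOrder.filter (fun fo => norm.contains fo)) none (some k)
  let others := ((PySem.List.enumerate tokens 0).filter (pvCondB norm)).map (fun p => p.2)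
  others ++ keep

-- ===== PRECONDITION & SPEC =====
def Spec_compress_framing (tokens : List String) (k : Int) (out : List String) : Prop := out = compress_framing_alt tokens k
instance (tokens : List String) (k : Int) (out : List String) : Decidable (Spec_compress_framing tokens k out) := by unfold Spec_compress_framing; infer_instance

-- ===== CLAIM (what is proved, stated in full; the proofs are below) =====
def Claim_equal_compress_framing : Prop := ∀ (tokens : List String) (k : Int), Dom_compress_framing tokens k → Spec_compress_framing tokens k (compress_framing tokens k)

-- ===== LEMMAS AND PROOFS =====

-- proof-only recursive descriptions of A's loop; pref collects the normalizations already consumed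
def pvKeepSpec (pref : List String) : List String → List String
  | [] => []
  | t :: ts =>
    let tl := pvNorm t
    if PySem.Set.contains pvFramingSet tl && !(PySem.Set.contains pref tl) then
      tl :: pvKeepSpec (pref ++ [tl]) ts
    else pvKeepSpec (pref ++ [tl]) ts

def pvOthersSpec (pref : List String) : List String → List String
  | [] => []
  | t :: ts =>
    let tl := pvNorm t
    if PySem.Set.contains pvFramingSet tl && !(PySem.Set.contains pref tl) then
      pvOthersSpec (pref ++ [tl]) ts
    else t :: pvOthersSpec (pref ++ [tl]) ts

lemma pvFramingSet_eq : pvFramingSet = pvFramingOrder := by decide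

lemma pvSetContains_append (l m : List String) (x : String) :
    PySem.Set.contains (l ++ m) x = (PySem.Set.contains l x || PySem.Set.contains m x) := by
  show List.contains _ _ = (List.contains l x || List.contains m x)
  simp

lemma pvSetContains_singleton (a x : String) :
    PySem.Set.contains [a] x = decide (x = a) := by
  show List.contains _ _ = _
  simp

lemma pvSetContains_iff (l : List String) (x : String) :
    PySem.Set.contains l x = true ↔ x ∈ l := by
  show List.contains _ _ = true ↔ _
  simp

lemma pvSetAdd (seen : List String) (x : String) (h : PySem.Set.contains seen x = false) :
    PySem.Set.add seen x = seen ++ [x] := by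
  simp only [PySem.Set.add]
  rw [if_neg]
  intro hx
  rw [h] at hx
  exact Bool.false_ne_true hx

lemma pvFoldA (ts : List String) : ∀ (keep others seen pref : List String),
    (∀ x, PySem.Set.contains pvFramingSet x = true →
      PySem.Set.contains seen x = PySem.Set.contains pref x) →
    (ts.foldl pvStepA (keep, others, seen)).1 = keep ++ pvKeepSpec pref ts ∧
    (ts.foldl pvStepA (keep, others, seen)).2.1 = others ++ pvOthersSpec pref ts := by
  induction ts with
  | nil => intro keep others seen pref _; simp [pvKeepSpec, pvOthersSpec]
  | cons t ts ih =>
    intro keep others seen pref h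
    simp only [List.foldl_cons, pvStepA, pvKeepSpec, pvOthersSpec]
    by_cases hf : PySem.Set.contains pvFramingSet (pvNorm t) = true
    · rw [hf, h _ hf]
      by_cases hs : PySem.Set.contains pref (pvNorm t) = true
      · simp only [hs, Bool.not_true, Bool.and_false]
        rw [if_neg Bool.false_ne_true, if_neg Bool.false_ne_true, if_neg Bool.false_ne_true]
        have h' : ∀ x, PySem.Set.contains pvFramingSet x = true →
            PySem.Set.contains seen x = PySem.Set.contains (pref ++ [pvNorm t]) x := by
          intro x hx
          rw [pvSetContains_append, pvSetContains_singleton, h _ hx]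
          by_cases hxe : x = pvNorm t
          · subst hxe; simp [(pvSetContains_iff pref (pvNorm t)).mp hs]
          · simp [hxe]
        obtain ⟨i1, i2⟩ := ih keep (others ++ [t]) seen (pref ++ [pvNorm t]) h'
        exact ⟨i1, by rw [i2]; simp⟩
      · simp only [Bool.not_eq_true] at hs
        have hseen : PySem.Set.contains seen (pvNorm t) = false := by rw [h _ hf, hs]
        simp only [hs, Bool.not_false, Bool.and_true]
        simp only [if_true]
        rw [pvSetAdd seen (pvNorm t) hseen]
        have h' : ∀ x, PySem.Set.contains pvFramingSet x = true →
            PySem.Set.contains (seen ++ [pvNorm t]) x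
              = PySem.Set.contains (pref ++ [pvNorm t]) x := by
          intro x hx
          rw [pvSetContains_append, pvSetContains_append, h _ hx]
        obtain ⟨i1, i2⟩ := ih (keep ++ [pvNorm t]) others (seen ++ [pvNorm t])
          (pref ++ [pvNorm t]) h'
        exact ⟨by rw [i1]; simp, i2⟩
    · simp only [Bool.not_eq_true] at hf
      simp only [hf, Bool.false_and]
      rw [if_neg Bool.false_ne_true, if_neg Bool.false_ne_true, if_neg Bool.false_ne_true]
      have h' : ∀ x, PySem.Set.contains pvFramingSet x = true →
          PySem.Set.contains seen x = PySem.Set.contains (pref ++ [pvNorm t]) x := by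
        intro x hx
        have hxe : x ≠ pvNorm t := by
          intro e; rw [e, hf] at hx; exact Bool.false_ne_true hx
        rw [pvSetContains_append, pvSetContains_singleton, h _ hx]
        simp [hxe]
      obtain ⟨i1, i2⟩ := ih keep (others ++ [t]) seen (pref ++ [pvNorm t]) h'
      exact ⟨i1, by rw [i2]; simp⟩

lemma pvFoldB (ts : List String) : ∀ (pre : List String),
    ((PySem.List.enumerate ts (pre.length : Int)).filter
        (pvCondB ((pre ++ ts).map pvNorm))).map (fun p => p.2)
      = pvOthersSpec (pre.map pvNorm) ts := by
  induction ts with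
  | nil => intro pre; simp [PySem.List.enumerate_nil, pvOthersSpec]
  | cons t ts ih =>
    intro pre
    rw [PySem.List.enumerate_cons, List.filter_cons]
    have hnorm : (pre ++ t :: ts).map pvNorm
        = pre.map pvNorm ++ pvNorm t :: ts.map pvNorm := by simp
    have hget : PySem.List.pyGetD ((pre ++ t :: ts).map pvNorm) (pre.length : Int) ""
        = pvNorm t := by
      rw [hnorm, PySem.List.pyGetD_natCast]
      rw [List.getD_eq_getElem?_getD, List.getElem?_append_right (by simp)]
      simp
    have hslice : PySem.List.slice ((pre ++ t :: ts).map pvNorm) none (some (pre.length : Int))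
        = pre.map pvNorm := by
      rw [hnorm, PySem.List.slice_to_natCast, List.take_left' (by simp)]
    have hcond : pvCondB ((pre ++ t :: ts).map pvNorm) ((pre.length : Int), t)
        = (!(PySem.Set.contains pvFramingSet (pvNorm t))
           || PySem.Set.contains (pre.map pvNorm) (pvNorm t)) := by
      show (!(PySem.Set.contains pvFramingSet
              (PySem.List.pyGetD ((pre ++ t :: ts).map pvNorm) (pre.length : Int) ""))
        || (PySem.List.slice ((pre ++ t :: ts).map pvNorm) none
              (some (pre.length : Int))).contains
            (PySem.List.pyGetD ((pre ++ t :: ts).map pvNorm) (pre.length : Int) "")) = _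
      rw [hget, hslice]
      rfl
    have ihx := ih (pre ++ [t])
    simp only [List.length_append, List.length_cons, List.length_nil, Nat.cast_add,
      Nat.cast_one, zero_add, List.append_assoc, List.singleton_append,
      List.map_append, List.map_cons, List.map_nil] at ihx
    have hspec : pvOthersSpec (pre.map pvNorm) (t :: ts)
        = if (PySem.Set.contains pvFramingSet (pvNorm t)
              && !(PySem.Set.contains (pre.map pvNorm) (pvNorm t))) = true then
            pvOthersSpec (pre.map pvNorm ++ [pvNorm t]) ts
          else t :: pvOthersSpec (pre.map pvNorm ++ [pvNorm t]) ts := rfl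
    rw [hspec, hcond]
    by_cases hA : PySem.Set.contains pvFramingSet (pvNorm t) = true
    · by_cases hB : PySem.Set.contains (pre.map pvNorm) (pvNorm t) = true
      · rw [hA, hB]
        simp only [Bool.not_true, Bool.false_or, Bool.and_false]
        simp only [if_true]
        rw [if_neg Bool.false_ne_true]
        simp only [List.map_cons]
        rw [hnorm, ihx]
      · simp only [Bool.not_eq_true] at hB
        rw [hA, hB]
        simp only [Bool.not_true, Bool.not_false, Bool.or_false, Bool.and_true]
        rw [if_neg Bool.false_ne_true]
        simp only [if_true]
        rw [hnorm]
        exact ihx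
    · simp only [Bool.not_eq_true] at hA
      rw [hA]
      simp only [Bool.not_false, Bool.true_or, Bool.false_and]
      simp only [if_true]
      rw [if_neg Bool.false_ne_true]
      simp only [List.map_cons]
      rw [hnorm, ihx]

lemma pvMemKeepSpec (ts : List String) : ∀ (pref : List String) (x : String),
    x ∈ pvKeepSpec pref ts ↔
      PySem.Set.contains pvFramingSet x = true ∧ x ∈ ts.map pvNorm ∧ x ∉ pref := by
  induction ts with
  | nil => intro pref x; simp [pvKeepSpec]
  | cons t ts ih =>
    intro pref x
    have hstep : pvKeepSpec pref (t :: ts)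
        = if (PySem.Set.contains pvFramingSet (pvNorm t)
              && !(PySem.Set.contains pref (pvNorm t))) = true then
            pvNorm t :: pvKeepSpec (pref ++ [pvNorm t]) ts
          else pvKeepSpec (pref ++ [pvNorm t]) ts := rfl
    rw [hstep]
    by_cases hA : PySem.Set.contains pvFramingSet (pvNorm t) = true
    · by_cases hB : PySem.Set.contains pref (pvNorm t) = true
      · rw [hA, hB]
        simp only [Bool.not_true, Bool.and_false]
        rw [if_neg Bool.false_ne_true, ih]
        have htl : pvNorm t ∈ pref := (pvSetContains_iff _ _).mp hB
        by_cases hxe : x = pvNorm t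
        · subst hxe; simp [htl]
        · simp [List.mem_append, hxe]
          try tauto
      · simp only [Bool.not_eq_true] at hB
        rw [hA, hB]
        simp only [Bool.not_false, Bool.and_self, if_true]
        have htl : pvNorm t ∉ pref := by
          intro hm; rw [(pvSetContains_iff _ _).mpr hm] at hB; simp at hB
        have hAF : pvNorm t ∈ pvFramingSet := (pvSetContains_iff _ _).mp hA
        by_cases hxe : x = pvNorm t
        · subst hxe; simp [hAF, htl]
        · simp only [List.mem_cons, ih, List.map_cons, List.mem_append, not_or]
          simp [hxe]
          try tauto
    · simp only [Bool.not_eq_true] at hA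
      rw [hA]
      simp only [Bool.false_and]
      rw [if_neg Bool.false_ne_true, ih]
      by_cases hxe : x = pvNorm t
      · subst hxe
        have hAF : pvNorm t ∉ pvFramingSet := by
          intro hm; rw [(pvSetContains_iff _ _).mpr hm] at hA; simp at hA
        simp [hAF]
      · simp [List.mem_append, hxe]
        try tauto

lemma pvNodupKeepSpec (ts : List String) : ∀ (pref : List String), (pvKeepSpec pref ts).Nodup := by
  induction ts with
  | nil => intro pref; simp [pvKeepSpec]
  | cons t ts ih =>
    intro pref
    have hstep : pvKeepSpec pref (t :: ts)
        = if (PySem.Set.contains pvFramingSet (pvNorm t)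
              && !(PySem.Set.contains pref (pvNorm t))) = true then
            pvNorm t :: pvKeepSpec (pref ++ [pvNorm t]) ts
          else pvKeepSpec (pref ++ [pvNorm t]) ts := rfl
    rw [hstep]
    split
    · refine List.nodup_cons.mpr ⟨?_, ih _⟩
      intro hm
      have := ((pvMemKeepSpec ts (pref ++ [pvNorm t]) (pvNorm t)).mp hm).2.2
      simp at this
    · exact ih _

lemma pvKeepEq (tokens : List String) :
    PySem.List.sorted (pvKeepSpec [] tokens) pvKey false
      = pvFramingOrder.filter (fun fo => (tokens.map pvNorm).contains fo) := by
  have hnodupF : (pvFramingOrder.filter (fun fo => (tokens.map pvNorm).contains fo)).Nodup :=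
    (by decide : pvFramingOrder.Nodup).filter _
  have hperm : (pvFramingOrder.filter (fun fo => (tokens.map pvNorm).contains fo)).Perm
      (pvKeepSpec [] tokens) := by
    rw [List.perm_ext_iff_of_nodup hnodupF (pvNodupKeepSpec tokens [])]
    intro x
    rw [List.mem_filter, pvMemKeepSpec]
    constructor
    · rintro ⟨hmem, hcont⟩
      refine ⟨?_, by simpa using hcont, by simp⟩
      rw [pvSetContains_iff, pvFramingSet_eq]
      exact hmem
    · rintro ⟨hf, hm, -⟩
      rw [pvSetContains_iff, pvFramingSet_eq] at hf
      exact ⟨hf, by simpa using hm⟩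
  have hpair : (pvFramingOrder.filter (fun fo => (tokens.map pvNorm).contains fo)).Pairwise
      (fun a b => pvKey a < pvKey b) :=
    List.Pairwise.sublist List.filter_sublist
      (by decide : pvFramingOrder.Pairwise (fun a b => pvKey a < pvKey b))
  exact PySem.List.sorted_eq_of_perm_of_pairwise_lt _ _ _ hperm hpair

-- ===== VERDICT (by name: the statement is the Claim_ definition above) =====
theorem compress_framing_spec : Claim_equal_compress_framing := by
  intro tokens k _
  unfold Spec_compress_framing compress_framing compress_framing_alt
  obtain ⟨h1, h2⟩ := pvFoldA tokens [] [] [] [] (fun _ _ => rfl)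
  have hB := pvFoldB tokens []
  simp only [List.nil_append, List.length_nil, Nat.cast_zero, List.map_nil] at h1 h2 hB
  dsimp only
  rw [h1, h2, pvKeepEq tokens, hB]
  simp
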